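-- pv_equiv track=rewrite | github.com/CarlosClemente65/CSVGenerator | CSVgenerator/CSVgenerator.py | calculo_dc
-- ===== SOURCE A (Python) =====
-- def calculo_dc(cadena):
--     suma = 0
--     peso = 1
--
--     # Iterar a través de los caracteres
--     for i, caracter in enumerate(cadena):
--         if caracter.isdigit():
--             digito = int(caracter)
--             suma += digito * peso
--         elif caracter.isalpha():
--             valor_letra = ord(caracter.upper()) - ord("A") + 10
--             suma += valor_letra * peso
--
--         # Alterna el peso (1 o 2)
--         peso = 2 if peso == 1 else 1
--
--     # Calcula el dígito de control como el resultado de restar a 98 el residuo de la suma dividida por 97 (números + letras)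
--     digito_control = 98 - (suma % 97)
--
--     return digito_control
-- ===== SOURCE B (Python) =====
-- def calculo_dc(cadena):
--     def valor(c):
--         if c.isdigit():
--             return int(c)
--         if c.isalpha():
--             return ord(c.upper()) - ord("A") + 10
--         return 0
--
--     # No weight state at all: weight 2 on odd positions simply means those
--     # values are counted twice, so the weighted sum equals the plain sum of
--     # all values plus the sum of the odd-position values once more.
--     vals = [valor(c) for c in cadena]
--     suma = sum(vals) + sum(vals[1::2])
--     return 98 - suma % 97
-- ===== Notes on version B (the rewrite author's own statement) =====
-- stated objective: alternative
-- what changed: Eliminates the weight variable entirely: instead of one pass toggling peso between 1 and 2, B materializes the list of character values and uses the identity weighted-sum = sum(vals) + sum(vals[1::2]) (odd positions counted twice), i.e. two staged unweighted sums over a list and its stride-2 slice.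
import Mathlib
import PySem

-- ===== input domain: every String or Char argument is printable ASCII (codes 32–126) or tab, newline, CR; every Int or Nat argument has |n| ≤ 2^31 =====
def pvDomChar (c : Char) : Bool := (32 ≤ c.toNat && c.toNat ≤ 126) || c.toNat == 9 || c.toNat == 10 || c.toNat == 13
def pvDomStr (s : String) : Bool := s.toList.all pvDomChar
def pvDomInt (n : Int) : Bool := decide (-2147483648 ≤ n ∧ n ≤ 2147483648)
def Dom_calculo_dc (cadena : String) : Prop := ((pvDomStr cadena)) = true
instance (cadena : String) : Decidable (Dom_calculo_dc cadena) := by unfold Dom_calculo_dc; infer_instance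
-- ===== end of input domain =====

-- B drops A's weight-toggling state entirely: it builds the list of character values and
-- computes sum(vals) + sum(vals[1::2]) (odd positions counted twice) — alternative decomposition, same cost.


-- ===== PORT A =====
-- one loop step: add the character's value times the current weight, toggle the weight
def pvStepA (sp : Int × Int) (c : Char) : Int × Int :=
  let suma :=
    if PySem.Chars.isdigit c then sp.1 + ((c.toNat : Int) - 48) * sp.2
    else if PySem.Chars.isalpha c then sp.1 + (((PySem.Chars.upperChar c).toNat : Int) - 65 + 10) * sp.2
    else sp.1
  (suma, if sp.2 == 1 then 2 else 1)

def calculo_dc (cadena : String) : Int :=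
  let r := cadena.toList.foldl pvStepA (0, 1)
  98 - PySem.Int.mod r.1 97

-- ===== PORT B =====
-- the helper valor(c) of Source B
def pvValor (c : Char) : Int :=
  if PySem.Chars.isdigit c then (c.toNat : Int) - 48
  else if PySem.Chars.isalpha c then ((PySem.Chars.upperChar c).toNat : Int) - 65 + 10
  else 0

-- hand port of the stride-2 slice xs[1::2] (PySem has no stepped slice); exact:
-- Python takes indices 1,3,5,…, i.e. the second of every consecutive pair.
def pvOdds : List Int → List Int
  | [] => []
  | [_] => []
  | _ :: b :: rest => b :: pvOdds rest

def calculo_dc_alt (cadena : String) : Int :=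
  let vals := cadena.toList.map pvValor
  let suma := vals.sum + (pvOdds vals).sum
  98 - PySem.Int.mod suma 97

-- ===== PRECONDITION & SPEC =====
def Spec_calculo_dc (cadena : String) (out : Int) : Prop := out = calculo_dc_alt cadena
instance (cadena : String) (out : Int) : Decidable (Spec_calculo_dc cadena out) := by unfold Spec_calculo_dc; infer_instance

-- ===== CLAIM =====
def Claim_equal_calculo_dc : Prop := ∀ (cadena : String), Dom_calculo_dc cadena → Spec_calculo_dc cadena (calculo_dc cadena)

-- ===== LEMMAS AND PROOFS =====
lemma pvStepA_eq (s w : Int) (c : Char) : pvStepA (s, w) c = (s + pvValor c * w, if w == 1 then 2 else 1) := by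
  simp only [pvStepA, pvValor]
  split_ifs <;> simp

lemma pvLoopA_eq (n : Nat) : ∀ (cs : List Char), cs.length ≤ n → ∀ s : Int,
    (List.foldl pvStepA (s, 1) cs).1
      = s + (cs.map pvValor).sum + (pvOdds (cs.map pvValor)).sum := by
  induction n with
  | zero =>
    intro cs h s
    have : cs = [] := List.eq_nil_of_length_eq_zero (Nat.le_zero.mp h)
    simp [this, pvOdds]
  | succ n ih =>
    intro cs h s
    match cs with
    | [] => simp [pvOdds]
    | [c] => simp [pvOdds, pvStepA_eq]
    | c :: d :: rest =>
      have hlen : rest.length ≤ n := by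
        simp only [List.length_cons] at h; omega
      calc (List.foldl pvStepA (s, 1) (c :: d :: rest)).1
          = (List.foldl pvStepA (s + pvValor c * 1 + pvValor d * 2, 1) rest).1 := by
            simp [List.foldl, pvStepA_eq]
        _ = s + pvValor c * 1 + pvValor d * 2 + (rest.map pvValor).sum
              + (pvOdds (rest.map pvValor)).sum := ih rest hlen _
        _ = s + ((c :: d :: rest).map pvValor).sum
              + (pvOdds ((c :: d :: rest).map pvValor)).sum := by
            simp [pvOdds]; ring

-- ===== VERDICT =====
theorem calculo_dc_spec : Claim_equal_calculo_dc := by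
  intro cadena _
  unfold Spec_calculo_dc calculo_dc calculo_dc_alt
  have := pvLoopA_eq cadena.toList.length cadena.toList (le_refl _) 0
  simp only [this, zero_add]
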